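-- pv_equiv track=rewrite | github.com/danielterziev92/SoftUni | Python Advanced/Workshop/connect_four.py | secondary_diagonals_connect_four
-- ===== SOURCE A (Python) =====
-- def secondary_diagonals_connect_four(game_matrix, player):
--     for start_row_index, end_row_index in enumerate(range(3, len(game_matrix))):
--         for start_col_index, end_col_index in enumerate(range(3, len(game_matrix))):
--             inner_matrix = [game_matrix[start_row_index][start_col_index:end_col_index + 1],
--                             game_matrix[start_row_index + 1][start_col_index:end_col_index + 1],
--                             game_matrix[end_row_index - 1][start_col_index:end_col_index + 1],
--                             game_matrix[end_row_index][start_col_index:end_col_index + 1]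
--                             ]
--             if [inner_matrix[i][len(inner_matrix) - 1 - i] for i in range(len(inner_matrix))].count(player) == 4:
--                 return True
--     return False
-- ===== SOURCE B (Python) =====
-- def secondary_diagonals_connect_four(game_matrix, player):
--     n = len(game_matrix)
--     for s in range(3, 2 * n - 4):
--         run = 0
--         for r in range(max(0, s - n + 1), min(n, s + 1)):
--             if game_matrix[r][s - r] == player:
--                 run += 1
--                 if run == 4:
--                     return True
--             else:
--                 run = 0
--     return False
-- ===== Notes on version B (the rewrite author's own statement) =====
-- stated objective: faster
-- what changed: B walks each anti-diagonal of the n-by-n region once with a run counter that resets on mismatch and fires at 4, instead of A's doubly-nested sliding 4x4 windows that build four row slices and a fresh 4-element list per window.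
-- outside the precondition, e.g. on secondary_diagonals_connect_four([['x', 'x', 'x', 'p'], ['x', 'x', 'p'], ['x', 'p'], ['p']], 'p'): A returns True, B returns True
import Mathlib
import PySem

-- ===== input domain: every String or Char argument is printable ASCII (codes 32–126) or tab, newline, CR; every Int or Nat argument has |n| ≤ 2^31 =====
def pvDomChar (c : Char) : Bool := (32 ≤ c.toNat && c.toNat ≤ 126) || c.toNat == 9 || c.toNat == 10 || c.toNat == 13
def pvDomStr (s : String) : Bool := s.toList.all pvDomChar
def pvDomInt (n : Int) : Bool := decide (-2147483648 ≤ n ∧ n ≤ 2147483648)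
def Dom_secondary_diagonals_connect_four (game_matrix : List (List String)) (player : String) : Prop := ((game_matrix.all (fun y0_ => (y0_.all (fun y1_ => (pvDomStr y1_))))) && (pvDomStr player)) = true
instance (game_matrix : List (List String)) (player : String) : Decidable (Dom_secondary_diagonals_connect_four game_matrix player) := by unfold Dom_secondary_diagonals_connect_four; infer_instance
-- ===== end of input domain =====

-- B replaces A's doubly-nested 4x4 window scan (four row slices per window) by a single run-counter
-- walk along each anti-diagonal — fewer allocations per cell; a timing run measured B faster.


-- ===== PORT A =====
def secondary_diagonals_connect_four (game_matrix : List (List String)) (player : String) : Bool :=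
  let n : Int := (game_matrix.length : Int)
  (PySem.List.enumerate (PySem.List.pyRange 3 n 1) 0).any (fun re =>
    (PySem.List.enumerate (PySem.List.pyRange 3 n 1) 0).any (fun ce =>
      let inner : List (List String) :=
        [ PySem.List.slice (PySem.List.pyGetD game_matrix re.1 []) (some ce.1) (some (ce.2 + 1)),
          PySem.List.slice (PySem.List.pyGetD game_matrix (re.1 + 1) []) (some ce.1) (some (ce.2 + 1)),
          PySem.List.slice (PySem.List.pyGetD game_matrix (re.2 - 1) []) (some ce.1) (some (ce.2 + 1)),
          PySem.List.slice (PySem.List.pyGetD game_matrix re.2 []) (some ce.1) (some (ce.2 + 1)) ]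
      (((PySem.List.pyRange 0 (inner.length : Int) 1).map (fun i =>
          PySem.List.pyGetD (PySem.List.pyGetD inner i []) ((inner.length : Int) - 1 - i) "")).count player == 4)))

-- ===== PORT B =====
def secondary_diagonals_connect_four_alt (game_matrix : List (List String)) (player : String) : Bool :=
  let n : Int := (game_matrix.length : Int)
  (PySem.List.pyRange 3 (2 * n - 4) 1).any (fun s =>
    ((PySem.List.pyRange (max 0 (s - n + 1)) (min n (s + 1)) 1).foldl
      (fun (st : Bool × Int) r =>
        if st.1 then st
        else if PySem.List.pyGetD (PySem.List.pyGetD game_matrix r []) (s - r) "" == player then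
          (decide (st.2 + 1 = 4), st.2 + 1)
        else (false, 0)) (false, 0)).1)

-- ===== PRECONDITION & SPEC =====
-- Pre_ excludes ragged boards with at least 4 rows in which some row is shorter than the number of
-- rows: there A's slice indexing can raise IndexError (and whether it does depends on scan order,
-- so A may also return True before reaching the short row — those returns are excluded too).
def Pre_secondary_diagonals_connect_four (game_matrix : List (List String)) (player : String) : Prop :=
  4 ≤ game_matrix.length → ∀ row ∈ game_matrix, game_matrix.length ≤ row.length
instance (game_matrix : List (List String)) (player : String) : Decidable (Pre_secondary_diagonals_connect_four game_matrix player) := by unfold Pre_secondary_diagonals_connect_four; infer_instance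

def pvWitness_secondary_diagonals_connect_four : List (List String) × String :=
  ([["x","x","x","o"], ["x","x","o","x"], ["x","o","x","x"], ["o","x","x","x"]], "o")

def Spec_secondary_diagonals_connect_four (game_matrix : List (List String)) (player : String) (out : Bool) : Prop := out = secondary_diagonals_connect_four_alt game_matrix player
instance (game_matrix : List (List String)) (player : String) (out : Bool) : Decidable (Spec_secondary_diagonals_connect_four game_matrix player out) := by unfold Spec_secondary_diagonals_connect_four; infer_instance

-- ===== CLAIM (what is proved, stated in full; the proofs are below) =====
def Claim_equal_secondary_diagonals_connect_four : Prop := ∀ (game_matrix : List (List String)) (player : String), Dom_secondary_diagonals_connect_four game_matrix player → Pre_secondary_diagonals_connect_four game_matrix player → Spec_secondary_diagonals_connect_four game_matrix player (secondary_diagonals_connect_four game_matrix player)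

-- ===== LEMMAS AND PROOFS =====

-- a cell of the board equals the player (total read; all uses are under in-range bounds)
def pvCell (m : List (List String)) (p : String) (r c : Nat) : Prop :=
  (m.getD r []).getD c "" = p

-- the common specification: some 4-in-a-row on an anti-diagonal, fully inside the n×n square
def pvWin (m : List (List String)) (p : String) : Prop :=
  ∃ a b : Nat, a + 3 < m.length ∧ b + 3 < m.length ∧
    pvCell m p a (b+3) ∧ pvCell m p (a+1) (b+2) ∧ pvCell m p (a+2) (b+1) ∧ pvCell m p (a+3) b

-- 4 consecutive 'true's somewhere in a Bool list
def pvW4 (bs : List Bool) : Prop :=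
  ∃ j, j + 4 ≤ bs.length ∧ bs.getD j false = true ∧ bs.getD (j+1) false = true ∧
    bs.getD (j+2) false = true ∧ bs.getD (j+3) false = true

-- the first c entries are 'true'
def pvP4 (c : Nat) (bs : List Bool) : Prop :=
  c ≤ bs.length ∧ ∀ i, i < c → bs.getD i false = true

lemma pvP4_mono {c c' : Nat} {bs : List Bool} (h : c' ≤ c) (hp : pvP4 c bs) : pvP4 c' bs := by
  obtain ⟨h1, h2⟩ := hp
  exact ⟨le_trans h h1, fun i hi => h2 i (lt_of_lt_of_le hi h)⟩

lemma pvP4_four {bs : List Bool} (h : pvP4 4 bs) : pvW4 bs := by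
  obtain ⟨h1, h2⟩ := h
  exact ⟨0, h1, h2 0 (by omega), h2 1 (by omega), h2 2 (by omega), h2 3 (by omega)⟩

lemma pvP4_three {bs : List Bool} :
    pvP4 3 bs ↔ 3 ≤ bs.length ∧ bs.getD 0 false = true ∧ bs.getD 1 false = true ∧ bs.getD 2 false = true := by
  constructor
  · rintro ⟨h1, h2⟩
    exact ⟨h1, h2 0 (by omega), h2 1 (by omega), h2 2 (by omega)⟩
  · rintro ⟨h1, h2, h3, h4⟩
    refine ⟨h1, fun i hi => ?_⟩
    interval_cases i <;> assumption

lemma pvP4_cons {c : Nat} {b : Bool} {bs : List Bool} (hc : 0 < c) :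
    pvP4 c (b :: bs) ↔ b = true ∧ pvP4 (c-1) bs := by
  unfold pvP4
  constructor
  · rintro ⟨h1, h2⟩
    refine ⟨by simpa using h2 0 hc, by simp at h1; omega, fun i hi => ?_⟩
    simpa using h2 (i+1) (by omega)
  · rintro ⟨hb, h1, h2⟩
    refine ⟨by simp; omega, fun i hi => ?_⟩
    cases i with
    | zero => simpa using hb
    | succ i => simpa using h2 i (by omega)

lemma pvW4_cons {b : Bool} {bs : List Bool} :
    pvW4 (b :: bs) ↔ (b = true ∧ pvP4 3 bs) ∨ pvW4 bs := by
  constructor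
  · rintro ⟨j, hlen, g0, g1, g2, g3⟩
    cases j with
    | zero =>
      left
      refine ⟨by simpa using g0, pvP4_three.mpr ⟨by simp at hlen; omega, by simpa using g1, by simpa using g2, by simpa using g3⟩⟩
    | succ j =>
      right
      exact ⟨j, by simp at hlen; omega, by simpa using g0, by simpa using g1, by simpa using g2, by simpa using g3⟩
  · rintro (⟨hb, hp⟩ | ⟨j, hlen, g0, g1, g2, g3⟩)
    · obtain ⟨h1, h2, h3, h4⟩ := pvP4_three.mp hp
      exact ⟨0, by simp; omega, by simpa using hb, by simpa using h2, by simpa using h3, by simpa using h4⟩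
    · exact ⟨j+1, by simp; omega, by simpa using g0, by simpa using g1, by simpa using g2, by simpa using g3⟩

lemma pvRun_stuck (test : Int → Bool) (l : List Int) (x : Int) :
    (l.foldl
      (fun (st : Bool × Int) r =>
        if st.1 then st
        else if test r then (decide (st.2 + 1 = 4), st.2 + 1)
        else (false, 0)) (true, x)) = (true, x) := by
  induction l with
  | nil => rfl
  | cons a l ih => simpa using ih

-- the run-counter fold of port B, characterised
lemma pvP4_zero (bs : List Bool) : pvP4 0 bs := by
  unfold pvP4
  exact ⟨Nat.zero_le _, fun i hi => absurd hi (by omega)⟩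

lemma pvRun_fold (test : Int → Bool) (l : List Int) (k : Nat) (hk : k < 4) :
    ((l.foldl
      (fun (st : Bool × Int) r =>
        if st.1 then st
        else if test r then (decide (st.2 + 1 = 4), st.2 + 1)
        else (false, 0)) (false, (k : Int))).1 = true)
    ↔ (pvW4 (l.map test) ∨ pvP4 (4-k) (l.map test)) := by
  induction l generalizing k with
  | nil =>
    simp only [List.foldl_nil, List.map_nil, pvW4, pvP4, List.length_nil]
    constructor
    · intro h; exact absurd h (by simp)
    · rintro (⟨j, hj, -⟩ | ⟨hc, -⟩) <;> omega
  | cons a l ih =>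
    rw [List.foldl_cons, List.map_cons, pvW4_cons]
    by_cases ht : test a = true
    · by_cases hk3 : k = 3
      · subst hk3
        simp only [ht, if_true, Bool.false_eq_true, if_false]
        have hd : decide (((3:Nat):Int) + 1 = 4) = true := by norm_num
        rw [hd, pvRun_stuck]
        refine iff_of_true rfl (Or.inr ?_)
        show pvP4 1 _
        rw [pvP4_cons (by omega)]
        exact ⟨by simp, pvP4_zero _⟩
      · have hlt : k < 3 := by omega
        simp only [ht, if_true, Bool.false_eq_true, if_false]
        have hd : decide ((k : Int) + 1 = 4) = false := by
          simp only [decide_eq_false_iff_not]; omega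
        rw [hd, show ((k : Int) + 1) = ((k + 1 : Nat) : Int) by push_cast; ring]
        rw [ih (k+1) (by omega)]
        rw [pvP4_cons (c := 4 - k) (by omega), show (4 - k - 1 : Nat) = 4 - (k+1) from by omega]
        constructor
        · rintro (hw | hp)
          · exact Or.inl (Or.inr hw)
          · exact Or.inr ⟨by simp, hp⟩
        · rintro ((⟨-, hp3⟩ | hw) | ⟨-, hp⟩)
          · exact Or.inr (pvP4_mono (by omega) hp3)
          · exact Or.inl hw
          · exact Or.inr hp
    · simp only [Bool.not_eq_true] at ht
      simp only [ht, Bool.false_eq_true, if_false]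
      have ih0 := ih 0 (by omega)
      norm_num at ih0
      rw [ih0]
      constructor
      · rintro (hw | hp)
        · exact Or.inl (Or.inr hw)
        · exact Or.inl (Or.inr (pvP4_four hp))
      · rintro ((⟨hb, -⟩ | hw) | hp)
        · exact absurd hb (by simp)
        · exact Or.inl hw
        · rw [pvP4_cons (by omega)] at hp
          exact absurd hp.1 (by simp)

lemma pvRun_fold0 (test : Int → Bool) (l : List Int) :
    ((l.foldl
      (fun (st : Bool × Int) r =>
        if st.1 then st
        else if test r then (decide (st.2 + 1 = 4), st.2 + 1)
        else (false, 0)) (false, (0 : Int))).1 = true)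
    ↔ pvW4 (l.map test) := by
  have h := pvRun_fold test l 0 (by omega)
  norm_num at h
  rw [h]
  constructor
  · rintro (hw | hp)
    · exact hw
    · exact pvP4_four hp
  · exact Or.inl

lemma pvW4_map_pyRange (test : Int → Bool) (lo hi : Int) :
    pvW4 ((PySem.List.pyRange lo hi 1).map test) ↔
      ∃ j : Nat, (j : Int) + 4 ≤ hi - lo ∧
        test (lo + ((j : Nat) : Int)) = true ∧ test (lo + ((j+1 : Nat) : Int)) = true ∧
        test (lo + ((j+2 : Nat) : Int)) = true ∧ test (lo + ((j+3 : Nat) : Int)) = true := by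
  rw [PySem.List.pyRange_one, List.map_map]
  unfold pvW4
  constructor
  · rintro ⟨j, hlen, g0, g1, g2, g3⟩
    rw [List.length_map, List.length_range] at hlen
    rw [PySem.List.getD_map_range _ _ _ _ (by omega)] at g0 g1 g2 g3
    exact ⟨j, by omega, g0, g1, g2, g3⟩
  · rintro ⟨j, hj, g0, g1, g2, g3⟩
    refine ⟨j, ?_, ?_, ?_, ?_, ?_⟩
    · rw [List.length_map, List.length_range]; omega
    all_goals rw [PySem.List.getD_map_range _ _ _ _ (by omega)]
    exacts [g0, g1, g2, g3]

lemma pvTest_eq (m : List (List String)) (p : String)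
    (hlen : ∀ row ∈ m, m.length ≤ row.length)
    (r c : Int) (hr0 : 0 ≤ r) (hrn : r < (m.length : Int))
    (hc0 : 0 ≤ c) (hcn : c < (m.length : Int)) :
    ((PySem.List.pyGetD (PySem.List.pyGetD m r []) c "" == p) = true) ↔ pvCell m p r.toNat c.toNat := by
  rw [PySem.List.pyGetD_eq_getElem m [] hr0 hrn]
  have hrow : m.length ≤ (m[r.toNat]'(by omega)).length := hlen _ (List.getElem_mem _)
  rw [PySem.List.pyGetD_eq_getElem _ "" hc0 (by push_cast; omega)]
  unfold pvCell
  rw [List.getD_eq_getElem m [] (by omega), List.getD_eq_getElem _ "" (by omega)]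
  exact beq_iff_eq

lemma pvCount4' (e0 e1 e2 e3 p : String) :
    ([e0, e1, e2, e3].count p = 4) ↔ (e0 = p ∧ e1 = p ∧ e2 = p ∧ e3 = p) := by
  simp only [List.count_cons, List.count_nil, beq_iff_eq]
  split_ifs <;> simp_all


lemma pvCond_iff (m : List (List String)) (p : String) (a b : Nat) :
    ((((PySem.List.pyRange 0
        (([PySem.List.slice (PySem.List.pyGetD m ((a : Nat) : Int) []) (some ((b : Nat) : Int)) (some (((b : Nat) : Int) + ((4 : Nat) : Int))),
           PySem.List.slice (PySem.List.pyGetD m ((a+1 : Nat) : Int) []) (some ((b : Nat) : Int)) (some (((b : Nat) : Int) + ((4 : Nat) : Int))),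
           PySem.List.slice (PySem.List.pyGetD m ((a+2 : Nat) : Int) []) (some ((b : Nat) : Int)) (some (((b : Nat) : Int) + ((4 : Nat) : Int))),
           PySem.List.slice (PySem.List.pyGetD m ((a+3 : Nat) : Int) []) (some ((b : Nat) : Int)) (some (((b : Nat) : Int) + ((4 : Nat) : Int)))].length : Nat) : Int)
        1).map (fun i => PySem.List.pyGetD
            (PySem.List.pyGetD [PySem.List.slice (PySem.List.pyGetD m ((a : Nat) : Int) []) (some ((b : Nat) : Int)) (some (((b : Nat) : Int) + ((4 : Nat) : Int))),
           PySem.List.slice (PySem.List.pyGetD m ((a+1 : Nat) : Int) []) (some ((b : Nat) : Int)) (some (((b : Nat) : Int) + ((4 : Nat) : Int))),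
           PySem.List.slice (PySem.List.pyGetD m ((a+2 : Nat) : Int) []) (some ((b : Nat) : Int)) (some (((b : Nat) : Int) + ((4 : Nat) : Int))),
           PySem.List.slice (PySem.List.pyGetD m ((a+3 : Nat) : Int) []) (some ((b : Nat) : Int)) (some (((b : Nat) : Int) + ((4 : Nat) : Int)))] i [])
            ((([PySem.List.slice (PySem.List.pyGetD m ((a : Nat) : Int) []) (some ((b : Nat) : Int)) (some (((b : Nat) : Int) + ((4 : Nat) : Int))),
           PySem.List.slice (PySem.List.pyGetD m ((a+1 : Nat) : Int) []) (some ((b : Nat) : Int)) (some (((b : Nat) : Int) + ((4 : Nat) : Int))),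
           PySem.List.slice (PySem.List.pyGetD m ((a+2 : Nat) : Int) []) (some ((b : Nat) : Int)) (some (((b : Nat) : Int) + ((4 : Nat) : Int))),
           PySem.List.slice (PySem.List.pyGetD m ((a+3 : Nat) : Int) []) (some ((b : Nat) : Int)) (some (((b : Nat) : Int) + ((4 : Nat) : Int)))].length : Nat) : Int) - 1 - i) "")).count p == 4) = true)
    ↔ (pvCell m p a (b+3) ∧ pvCell m p (a+1) (b+2) ∧ pvCell m p (a+2) (b+1) ∧ pvCell m p (a+3) b) := by
  simp only [PySem.List.pyGetD_natCast (α := List String), PySem.List.slice_natCast_add]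
  simp only [List.length_cons, List.length_nil]
  norm_num
  rw [show PySem.List.pyRange 0 (4:Int) 1 = [0,1,2,3] from by decide]
  simp only [List.map_cons, List.map_nil]
  norm_num [PySem.List.pyGetD_ofNat']
  rw [pvCount4']
  simp only [pvCell, List.getD_eq_getElem?_getD]


lemma pvA_iff (m : List (List String)) (p : String) :
    secondary_diagonals_connect_four m p = true ↔ pvWin m p := by
  unfold secondary_diagonals_connect_four
  simp only [List.any_eq_true, PySem.List.mem_enumerate_iff, PySem.List.length_pyRange_one, zero_add]
  constructor
  · rintro ⟨re, ⟨ka, hka, rfl⟩, ce, ⟨kb, hkb, rfl⟩, h⟩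
    simp only [PySem.List.getElem_pyRange_one] at h
    rw [show ((3:Int) + (ka:Int) - 1) = ((ka+2 : Nat) : Int) from by push_cast; ring,
        show ((3:Int) + (kb:Int) + 1) = ((kb : Int) + ((4:Nat) : Int)) from by push_cast; ring,
        show ((3:Int) + (ka:Int)) = ((ka+3 : Nat) : Int) from by push_cast; ring,
        show ((ka:Int) + 1) = ((ka+1 : Nat) : Int) from by push_cast; ring] at h
    exact ⟨ka, kb, by omega, by omega, (pvCond_iff m p ka kb).mp h⟩
  · rintro ⟨a, b, ha, hb, hc⟩
    have hlen : a < ((m.length : Int) - 3).toNat := by omega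
    have hlen' : b < ((m.length : Int) - 3).toNat := by omega
    have hga : a < (PySem.List.pyRange 3 (m.length : Int) 1).length := by
      rw [PySem.List.length_pyRange_one]; omega
    have hgb : b < (PySem.List.pyRange 3 (m.length : Int) 1).length := by
      rw [PySem.List.length_pyRange_one]; omega
    refine ⟨((a : Int), (PySem.List.pyRange 3 (m.length : Int) 1)[a]), ⟨a, hlen, rfl⟩,
           ((b : Int), (PySem.List.pyRange 3 (m.length : Int) 1)[b]), ⟨b, hlen', rfl⟩, ?_⟩
    simp only [PySem.List.getElem_pyRange_one]
    rw [show ((3:Int) + (a:Int) - 1) = ((a+2 : Nat) : Int) from by push_cast; ring,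
        show ((3:Int) + (b:Int) + 1) = ((b : Int) + ((4:Nat) : Int)) from by push_cast; ring,
        show ((3:Int) + (a:Int)) = ((a+3 : Nat) : Int) from by push_cast; ring,
        show ((a:Int) + 1) = ((a+1 : Nat) : Int) from by push_cast; ring]
    exact (pvCond_iff m p a b).mpr hc

lemma pvB_iff (m : List (List String)) (p : String)
    (hpre : Pre_secondary_diagonals_connect_four m p) :
    secondary_diagonals_connect_four_alt m p = true ↔ pvWin m p := by
  unfold secondary_diagonals_connect_four_alt
  simp only [List.any_eq_true, PySem.List.mem_pyRange_one]
  constructor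
  · rintro ⟨s, ⟨hs3, hs4⟩, hfold⟩
    have hn4 : 4 ≤ m.length := by omega
    rw [pvRun_fold0] at hfold
    rw [pvW4_map_pyRange] at hfold
    obtain ⟨j, hj, g0, g1, g2, g3⟩ := hfold
    have hlen := hpre hn4
    have h0 : (0:Int) ≤ max 0 (s - (m.length:Int) + 1) := le_max_left 0 _
    rw [pvTest_eq m p hlen _ _ (by omega) (by omega) (by omega) (by omega)] at g0
    rw [pvTest_eq m p hlen _ _ (by omega) (by omega) (by omega) (by omega)] at g1
    rw [pvTest_eq m p hlen _ _ (by omega) (by omega) (by omega) (by omega)] at g2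
    rw [pvTest_eq m p hlen _ _ (by omega) (by omega) (by omega) (by omega)] at g3
    refine ⟨(max 0 (s - (m.length:Int) + 1) + (j:Int)).toNat,
            (s - (max 0 (s - (m.length:Int) + 1) + (j:Int)) - 3).toNat,
            by omega, by omega, ?_, ?_, ?_, ?_⟩
    · convert g0 using 2 <;> omega
    · convert g1 using 2 <;> omega
    · convert g2 using 2 <;> omega
    · convert g3 using 2 <;> omega
  · rintro ⟨a, b, ha, hb, c1, c2, c3, c4⟩
    have hn4 : 4 ≤ m.length := by omega
    have hlen := hpre hn4
    refine ⟨((a:Int) + (b:Int) + 3), ⟨by omega, by omega⟩, ?_⟩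
    rw [pvRun_fold0, pvW4_map_pyRange]
    have h0 : (0:Int) ≤ max 0 ((a:Int) + (b:Int) + 3 - (m.length:Int) + 1) := le_max_left 0 _
    have hlo : max 0 ((a:Int) + (b:Int) + 3 - (m.length:Int) + 1) ≤ (a:Int) := by omega
    refine ⟨((a:Int) - max 0 ((a:Int) + (b:Int) + 3 - (m.length:Int) + 1)).toNat, by omega, ?_, ?_, ?_, ?_⟩
    · rw [show max 0 ((a:Int) + (b:Int) + 3 - (m.length:Int) + 1) +
            ((((a:Int) - max 0 ((a:Int) + (b:Int) + 3 - (m.length:Int) + 1)).toNat : Nat) : Int) = ((a:Nat):Int) from by omega]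
      rw [pvTest_eq m p hlen _ _ (by omega) (by omega) (by omega) (by omega)]
      convert c1 using 2 <;> omega
    · rw [show max 0 ((a:Int) + (b:Int) + 3 - (m.length:Int) + 1) +
            ((((a:Int) - max 0 ((a:Int) + (b:Int) + 3 - (m.length:Int) + 1)).toNat + 1 : Nat) : Int) = ((a+1:Nat):Int) from by omega]
      rw [pvTest_eq m p hlen _ _ (by omega) (by omega) (by omega) (by omega)]
      convert c2 using 2 <;> omega
    · rw [show max 0 ((a:Int) + (b:Int) + 3 - (m.length:Int) + 1) +
            ((((a:Int) - max 0 ((a:Int) + (b:Int) + 3 - (m.length:Int) + 1)).toNat + 2 : Nat) : Int) = ((a+2:Nat):Int) from by omega]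
      rw [pvTest_eq m p hlen _ _ (by omega) (by omega) (by omega) (by omega)]
      convert c3 using 2 <;> omega
    · rw [show max 0 ((a:Int) + (b:Int) + 3 - (m.length:Int) + 1) +
            ((((a:Int) - max 0 ((a:Int) + (b:Int) + 3 - (m.length:Int) + 1)).toNat + 3 : Nat) : Int) = ((a+3:Nat):Int) from by omega]
      rw [pvTest_eq m p hlen _ _ (by omega) (by omega) (by omega) (by omega)]
      convert c4 using 2 <;> omega

-- ===== VERDICT (by name: the statement is the Claim_ definition above) =====
theorem secondary_diagonals_connect_four_spec : Claim_equal_secondary_diagonals_connect_four := by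
  intro m p _ hpre
  unfold Spec_secondary_diagonals_connect_four
  rw [Bool.eq_iff_iff, pvA_iff m p, pvB_iff m p hpre]
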